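-- pv_equiv track=rewrite | github.com/Siecje/htmd | tests/utils.py | _insert_after_section
-- ===== SOURCE A (Python) =====
-- def _insert_after_section(
--     lines: list[str],
--     section: str,
--     new_line: str,
-- ) -> list[str]:
--     out: list[str] = []
--     inserted = False
--     curr: str | None = None
--     for line in lines:
--         stripped = line.strip()
--         if stripped.startswith('[') and stripped.endswith(']'):
--             curr = stripped[1:-1].strip()
--             out.append(line)
--             if curr == section and not inserted:
--                 out.append(
--                     new_line if new_line.endswith('\n') else new_line + '\n',
--                 )
--                 inserted = True
--             continue
--         out.append(line)
--     return out
-- ===== SOURCE B (Python) =====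
-- def _insert_after_section(
--     lines: list[str],
--     section: str,
--     new_line: str,
-- ) -> list[str]:
--     idx = None
--     for i, line in enumerate(lines):
--         s = line.strip()
--         if s.startswith('[') and s.endswith(']') and s[1:-1].strip() == section:
--             idx = i
--             break
--     if idx is None:
--         return list(lines)
--     formatted = new_line if new_line.endswith('\n') else new_line + '\n'
--     return lines[:idx + 1] + [formatted] + lines[idx + 1:]
-- ===== Notes on version B (the rewrite author's own statement) =====
-- stated objective: simpler
-- what changed: Replaces A's accumulate-in-a-loop construction (output list built line by line with an inserted flag and a dead curr variable) by a locate-then-splice decomposition: find the index of the first matching section header, then return lines[:i+1] + [formatted] + lines[i+1:], or a copy if no header matches.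
import Mathlib
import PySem

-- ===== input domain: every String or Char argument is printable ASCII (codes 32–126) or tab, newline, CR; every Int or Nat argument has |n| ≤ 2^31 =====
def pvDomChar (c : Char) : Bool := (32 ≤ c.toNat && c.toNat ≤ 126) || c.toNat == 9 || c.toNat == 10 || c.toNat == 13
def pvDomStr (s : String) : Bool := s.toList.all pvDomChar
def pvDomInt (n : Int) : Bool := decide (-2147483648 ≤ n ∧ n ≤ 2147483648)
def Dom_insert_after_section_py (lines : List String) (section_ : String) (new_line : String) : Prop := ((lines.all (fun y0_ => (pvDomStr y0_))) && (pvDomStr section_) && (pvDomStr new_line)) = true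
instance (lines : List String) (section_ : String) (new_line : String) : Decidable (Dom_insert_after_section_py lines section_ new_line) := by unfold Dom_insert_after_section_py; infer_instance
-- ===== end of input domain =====

-- B replaces A's accumulate-in-a-loop construction (out list + inserted flag) by a locate-then-splice
-- decomposition: find the index of the first matching section header, then splice the formatted line in.

-- ===== PORT A =====
-- the `for line in lines` loop of A, threading the `inserted` flag; `out` becomes the returned list
def insertAfterGoA (section_ new_line : String) : List String → Bool → List String
  | [], _ => []
  | line :: rest, inserted =>
    let stripped := PySem.Str.strip line
    if PySem.Str.startswith stripped "[" && PySem.Str.endswith stripped "]" then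
      let curr := PySem.Str.strip (PySem.Str.slice stripped (some 1) (some (-1)))
      if curr == section_ && !inserted then
        line :: (if PySem.Str.endswith new_line "\n" then new_line else new_line ++ "\n")
             :: insertAfterGoA section_ new_line rest true
      else
        line :: insertAfterGoA section_ new_line rest inserted
    else
      line :: insertAfterGoA section_ new_line rest inserted

def insert_after_section_py (lines : List String) (section_ : String) (new_line : String) : List String :=
  insertAfterGoA section_ new_line lines false

-- ===== PORT B =====
-- Source B's loop-body predicate: stripped line is '[...]' and the inner text strips to section_
def pvHeaderMatch (section_ : String) (line : String) : Bool :=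
  let s := PySem.Str.strip line
  PySem.Str.startswith s "[" && PySem.Str.endswith s "]" &&
    (PySem.Str.strip (PySem.Str.slice s (some 1) (some (-1))) == section_)

-- Source B's enumerate-and-break scan for the first matching header index
def pvFindHeaderIdx (section_ : String) : List String → Option Nat
  | [] => none
  | line :: rest =>
    if pvHeaderMatch section_ line then some 0
    else (pvFindHeaderIdx section_ rest).map (· + 1)

def insert_after_section_py_alt (lines : List String) (section_ : String) (new_line : String) : List String :=
  match pvFindHeaderIdx section_ lines with
  | none => lines
  | some i =>
    let formatted := if PySem.Str.endswith new_line "\n" then new_line else new_line ++ "\n"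
    -- lines[:i+1] / lines[i+1:] with the nonnegative in-range bound i+1 are exactly take/drop
    lines.take (i + 1) ++ [formatted] ++ lines.drop (i + 1)

-- ===== PRECONDITION & SPEC =====
def Spec_insert_after_section_py (lines : List String) (section_ : String) (new_line : String) (out : List String) : Prop := out = insert_after_section_py_alt lines section_ new_line
instance (lines : List String) (section_ : String) (new_line : String) (out : List String) : Decidable (Spec_insert_after_section_py lines section_ new_line out) := by unfold Spec_insert_after_section_py; infer_instance

-- ===== CLAIM (what is proved, stated in full; the proofs are below) =====
def Claim_equal_insert_after_section_py : Prop := ∀ (lines : List String) (section_ : String) (new_line : String), Dom_insert_after_section_py lines section_ new_line → Spec_insert_after_section_py lines section_ new_line (insert_after_section_py lines section_ new_line)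

-- ===== LEMMAS AND PROOFS =====

-- once A has inserted, the rest of its loop only copies lines over
theorem insertAfterGoA_true (section_ new_line : String) :
    ∀ rest : List String, insertAfterGoA section_ new_line rest true = rest := by
  intro rest
  induction rest with
  | nil => rfl
  | cons l t ih => simp [insertAfterGoA, ih]

theorem insertAfterGoA_eq_alt (section_ new_line : String) :
    ∀ lines : List String,
      insertAfterGoA section_ new_line lines false =
        insert_after_section_py_alt lines section_ new_line := by
  intro lines
  induction lines with
  | nil => rfl
  | cons l t ih =>
    simp only [insertAfterGoA, insert_after_section_py_alt, pvFindHeaderIdx]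
    by_cases h : pvHeaderMatch section_ l = true
    · have hm := h
      simp only [pvHeaderMatch] at hm
      rw [Bool.and_eq_true] at hm
      obtain ⟨hb1, hb2⟩ := hm
      rw [if_pos h, if_pos hb1]
      simp only [hb2, Bool.not_false, Bool.and_true, insertAfterGoA_true,
        List.take_succ_cons, List.take_zero, List.drop_succ_cons, List.drop_zero]
      rfl
    · rw [if_neg h]
      have hm : pvHeaderMatch section_ l = false := by
        revert h; cases pvHeaderMatch section_ l <;> simp
      simp only [pvHeaderMatch] at hm
      have hL :
          (if (PySem.Str.startswith (PySem.Str.strip l) "[" &&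
                PySem.Str.endswith (PySem.Str.strip l) "]") = true then
            if (PySem.Str.strip (PySem.Str.slice (PySem.Str.strip l) (some 1) (some (-1))) ==
                  section_ && !false) = true then
              l :: (if PySem.Str.endswith new_line "\n" = true then new_line
                    else new_line ++ "\n") :: insertAfterGoA section_ new_line t true
            else l :: insertAfterGoA section_ new_line t false
          else l :: insertAfterGoA section_ new_line t false) =
            l :: insertAfterGoA section_ new_line t false := by
        by_cases hb1 : (PySem.Str.startswith (PySem.Str.strip l) "[" &&
            PySem.Str.endswith (PySem.Str.strip l) "]") = true
        · rw [hb1] at hm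
          rw [Bool.true_and] at hm
          rw [if_pos hb1]
          simp only [hm, Bool.false_and, Bool.false_eq_true, if_false]
        · rw [if_neg hb1]
      rw [hL, ih, insert_after_section_py_alt]
      cases hfi : pvFindHeaderIdx section_ t with
      | none => simp
      | some i => simp [List.take_succ_cons, List.drop_succ_cons]

-- ===== VERDICT (by name: the statement is the Claim_ definition above) =====
theorem insert_after_section_py_spec : Claim_equal_insert_after_section_py := by
  intro lines section_ new_line _
  unfold Spec_insert_after_section_py insert_after_section_py
  exact insertAfterGoA_eq_alt section_ new_line lines
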